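-- pv_equiv track=rewrite | github.com/maximelbf23/Cadet-AF-culture-G | PSY0_Training/convert_csv_to_qcm.py | build_signature_pools
-- ===== SOURCE A (Python) =====
-- def build_signature_pools(questions):
--     """Group answers by question signature."""
--     pools = {}
--     for q in questions:
--         sig = q["signature"]
--         if sig:
--             if sig not in pools:
--                 pools[sig] = []
--             pools[sig].append(q["correct_answer"])
--     return pools
-- ===== SOURCE B (Python) =====
-- def build_signature_pools(questions):
--     """Group answers by question signature (two-pass: collect keys, then gather)."""
--     sigs = []
--     for q in questions:
--         s = q["signature"]
--         if s and s not in sigs: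
--             sigs.append(s)
--     return {s: [q["correct_answer"] for q in questions if q["signature"] == s]
--             for s in sigs}
-- ===== Notes on version B (the rewrite author's own statement) =====
-- stated objective: alternative
-- what changed: Replaces A's single-pass scatter-into-buckets dict with a two-stage pass: first collect the distinct truthy signatures in first-occurrence order, then build each pool by a filtering comprehension over the whole question list.
import Mathlib
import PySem

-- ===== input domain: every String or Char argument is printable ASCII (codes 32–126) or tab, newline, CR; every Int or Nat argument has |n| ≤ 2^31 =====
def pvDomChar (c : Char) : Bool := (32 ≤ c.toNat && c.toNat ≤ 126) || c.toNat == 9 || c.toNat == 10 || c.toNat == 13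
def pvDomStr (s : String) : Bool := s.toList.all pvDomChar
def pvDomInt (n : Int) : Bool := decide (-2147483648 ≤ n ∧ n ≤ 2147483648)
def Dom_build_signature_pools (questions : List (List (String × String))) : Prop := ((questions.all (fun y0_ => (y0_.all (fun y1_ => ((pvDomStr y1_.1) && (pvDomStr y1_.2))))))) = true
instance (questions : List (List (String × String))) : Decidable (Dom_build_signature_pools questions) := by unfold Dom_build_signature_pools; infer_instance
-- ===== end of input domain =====

-- B replaces A's single-pass scatter-into-buckets dict with a two-stage pass (collect distinct
-- truthy signatures in first-occurrence order, then gather each pool by filtering); same result.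


-- q["k"] on an association-list dict: first matching key (none = KeyError, excluded by Pre_).
def pvDGet (q : List (String × String)) (k : String) : Option String :=
  (q.find? (fun p => p.1 == k)).map (fun p => p.2)

-- ===== PORT A =====
def build_signature_pools (questions : List (List (String × String))) : List (String × List String) :=
  (questions.foldl
    (fun (pools : PySem.Dict String (List String)) q =>
      let sig := (pvDGet q "signature").getD ""
      if sig ≠ "" then
        let pools' := if pools.contains sig then pools else pools.insert sig []
        pools'.modify sig [] (fun l => l ++ [(pvDGet q "correct_answer").getD ""])
      else pools)
    PySem.Dict.empty).items

-- ===== PORT B =====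
def build_signature_pools_alt (questions : List (List (String × String))) : List (String × List String) :=
  let sigs : List String := questions.foldl
    (fun acc q =>
      let s := (pvDGet q "signature").getD ""
      if s ≠ "" ∧ s ∉ acc then acc ++ [s] else acc) []
  sigs.map (fun s =>
    (s, (questions.filter (fun q => (pvDGet q "signature").getD "" == s)).map
          (fun q => (pvDGet q "correct_answer").getD "")))

-- ===== PRECONDITION & SPEC =====
-- Pre_ excludes exactly the KeyError inputs: every question must carry "signature", and
-- "correct_answer" whenever its signature is truthy (nonempty).
def Pre_build_signature_pools (questions : List (List (String × String))) : Prop :=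
  (questions.all (fun q =>
    (pvDGet q "signature").isSome &&
      (((pvDGet q "signature").getD "" == "") || (pvDGet q "correct_answer").isSome))) = true
instance (questions : List (List (String × String))) : Decidable (Pre_build_signature_pools questions) := by unfold Pre_build_signature_pools; infer_instance

def pvWitness_build_signature_pools : (List (List (String × String))) :=
  [[("signature", "a"), ("correct_answer", "x")], [("signature", ""), ("id", "3")]]

def Spec_build_signature_pools (questions : List (List (String × String))) (out : List (String × List String)) : Prop := out = build_signature_pools_alt questions
instance (questions : List (List (String × String))) (out : List (String × List String)) : Decidable (Spec_build_signature_pools questions out) := by unfold Spec_build_signature_pools; infer_instance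

-- ===== CLAIM (what is proved, stated in full; the proofs are below) =====
def Claim_equal_build_signature_pools : Prop := ∀ (questions : List (List (String × String))), Dom_build_signature_pools questions → Pre_build_signature_pools questions → Spec_build_signature_pools questions (build_signature_pools questions)

-- ===== LEMMAS AND PROOFS =====

-- shorthands used only by the proofs
def pvSig (q : List (String × String)) : String := (pvDGet q "signature").getD ""
def pvAns (q : List (String × String)) : String := (pvDGet q "correct_answer").getD ""

-- A's loop body: setdefault-then-append is exactly Dict.modify with default [].
theorem pvStepA_eq (d : PySem.Dict String (List String)) (q : List (String × String)) :
    (if pvSig q ≠ "" then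
        (if d.contains (pvSig q) then d else d.insert (pvSig q) []).modify (pvSig q) []
          (fun l => l ++ [pvAns q])
      else d)
    = (if pvSig q ≠ "" then d.modify (pvSig q) [] (fun l => l ++ [pvAns q]) else d) := by
  by_cases h : pvSig q = ""
  · simp [h]
  · simp only [h, ne_eq, not_false_eq_true, if_pos]
    by_cases hc : d.contains (pvSig q)
    · simp [hc]
    · simp only [hc, Bool.false_eq_true, if_neg, not_false_eq_true]
      simp only [PySem.Dict.modify, PySem.Dict.getD_insert_self, PySem.Dict.insert_insert_self,
        PySem.Dict.getD_of_not_contains d [] (by simpa using hc)]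

-- conditional fold over questions = unconditional fold over the (sig, ans) pairs of truthy questions
theorem pvFoldA_eq (questions : List (List (String × String))) (d : PySem.Dict String (List String)) :
    questions.foldl (fun d q => if pvSig q ≠ "" then d.modify (pvSig q) [] (fun l => l ++ [pvAns q]) else d) d
    = ((questions.filter (fun q => pvSig q != "")).map (fun q => (pvSig q, pvAns q))).foldl
        (fun d p => d.modify p.1 [] (fun l => l ++ [p.2])) d := by
  induction questions generalizing d with
  | nil => rfl
  | cons q qs ih =>
    by_cases h : pvSig q = ""
    · rw [List.foldl_cons, if_neg (by simp [h]), List.filter_cons_of_neg (by simp [h]), ih]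
    · rw [List.foldl_cons, if_pos h, List.filter_cons_of_pos (by simp [h]), List.map_cons,
        List.foldl_cons, ih]

-- B's key-collection loop is a Set.add fold over the truthy signatures
theorem pvSigs_eq (questions : List (List (String × String))) (acc : List String) :
    questions.foldl (fun acc q => if pvSig q ≠ "" ∧ pvSig q ∉ acc then acc ++ [pvSig q] else acc) acc
    = ((questions.filter (fun q => pvSig q != "")).map (fun q => pvSig q)).foldl PySem.Set.add acc := by
  induction questions generalizing acc with
  | nil => rfl
  | cons q qs ih =>
    by_cases h : pvSig q = ""
    · simp [h, ih]
    · by_cases hm : pvSig q ∈ acc <;>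
        simp [h, hm, ih]

-- per-key pools agree (for a truthy key)
theorem pvPool_eq (questions : List (List (String × String))) (k : String) (hk : k ≠ "") :
    (((questions.filter (fun q => pvSig q != "")).map (fun q => (pvSig q, pvAns q))).filter
        (fun p => p.1 == k)).map (fun p => p.2)
    = (questions.filter (fun q => pvSig q == k)).map (fun q => pvAns q) := by
  rw [List.filter_map, List.filter_filter]
  rw [List.filter_congr (q := fun q => pvSig q == k)
    (by intro q _; by_cases h : pvSig q = k <;> simp [Function.comp, h, hk])]
  simp [List.map_map, Function.comp]

-- ===== VERDICT (by name: the statement is the Claim_ definition above) =====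
theorem build_signature_pools_spec : Claim_equal_build_signature_pools := by
  intro questions _ _
  unfold Spec_build_signature_pools build_signature_pools build_signature_pools_alt
  have h1 : questions.foldl
      (fun (pools : PySem.Dict String (List String)) q =>
        let sig := (pvDGet q "signature").getD ""
        if sig ≠ "" then
          let pools' := if pools.contains sig then pools else pools.insert sig []
          pools'.modify sig [] (fun l => l ++ [(pvDGet q "correct_answer").getD ""])
        else pools) PySem.Dict.empty
      = questions.foldl
        (fun d q => if pvSig q ≠ "" then d.modify (pvSig q) [] (fun l => l ++ [pvAns q]) else d)
        PySem.Dict.empty := by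
    congr 1; funext d q; exact pvStepA_eq d q
  rw [h1, pvFoldA_eq]
  show _ = (questions.foldl
      (fun acc q => if pvSig q ≠ "" ∧ pvSig q ∉ acc then acc ++ [pvSig q] else acc) []).map
    (fun s => (s, (questions.filter (fun q => pvSig q == s)).map (fun q => pvAns q)))
  rw [pvSigs_eq]
  set l := (questions.filter (fun q => pvSig q != "")).map (fun q => (pvSig q, pvAns q)) with hl
  have hkeys : (l.foldl (fun d p => d.modify p.1 [] (fun l => l ++ [p.2])) PySem.Dict.empty).keys
      = PySem.Set.ofList (l.map Prod.fst) := by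
    rw [PySem.Dict.keys_foldl_modify_key l Prod.fst [] (fun _ p => fun v => v ++ [p.2])]
    simp [PySem.Set.update_nil_left]
  have hnd : (l.foldl (fun d p => d.modify p.1 [] (fun l => l ++ [p.2])) PySem.Dict.empty).keys.Nodup := by
    exact PySem.Dict.nodup_keys_foldl_modify_key l Prod.fst [] (fun _ p => fun v => v ++ [p.2])
      PySem.Dict.empty (by simp)
  rw [PySem.Dict.items_eq_map_keys _ hnd [], hkeys]
  have hmapfst : l.map Prod.fst = (questions.filter (fun q => pvSig q != "")).map (fun q => pvSig q) := by
    rw [hl, List.map_map]; rfl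
  rw [← hmapfst]
  have hofl : PySem.Set.ofList (l.map Prod.fst)
      = (l.map Prod.fst).foldl PySem.Set.add [] := PySem.Set.ofList_eq_foldl _
  rw [← hofl]
  apply List.map_congr_left
  intro k hk
  have hk' : k ≠ "" := by
    rw [PySem.Set.mem_ofList] at hk
    obtain ⟨p, hp, rfl⟩ := List.mem_map.mp hk
    obtain ⟨q, hq, rfl⟩ := List.mem_map.mp hp
    have := (List.mem_filter.mp hq).2
    simpa using this
  rw [PySem.Dict.getD_foldl_modify_append]
  simp only [PySem.Dict.getD_empty, List.nil_append]
  exact congrArg (fun v => (k, v)) (pvPool_eq questions k hk')
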